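-- pv_equiv track=rewrite | github.com/nbljain/SQLChatbot | src/utils/csv_file_loader.py | get_table_relationships
-- ===== SOURCE A (Python) =====
-- from typing import Dict, List, Any, Optional, Union
--
-- TABLE_RELATIONSHIPS = {
--     "customers": [],  # No dependencies
--     "products": [],   # No dependencies
--     "orders": ["customers"],  # Depends on customers
--     "order_items": ["orders", "products"],  # Depends on orders and products
--     "employees": []   # No dependencies
-- }
--
-- def get_table_relationships(table_name: str) -> Dict[str, str]:
--     """Get the relationships for a table"""
--     relationships = {}
--
--     # Tables that this table depends on
--     if table_name in TABLE_RELATIONSHIPS: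
--         for dep in TABLE_RELATIONSHIPS[table_name]:
--             relationships[dep] = {
--                 "relationship": "depends on",
--                 "direction": "incoming"
--             }
--
--     # Tables that depend on this table
--     for table, deps in TABLE_RELATIONSHIPS.items():
--         if table_name in deps:
--             relationships[table] = {
--                 "relationship": "depended on by",
--                 "direction": "outgoing"
--             }
--
--     return relationships
-- ===== SOURCE B (Python) =====
-- TABLE_RELATIONSHIPS = {
--     "customers": [],
--     "products": [],
--     "orders": ["customers"],
--     "order_items": ["orders", "products"],
--     "employees": []
-- }
--
-- def _build_relationship_table():
--     """Precompute the full answer for every table: walk each dependency edge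
--     (t depends on d) once and record it on both endpoints."""
--     table = {name: {} for name in TABLE_RELATIONSHIPS}
--     for t, deps in TABLE_RELATIONSHIPS.items():
--         for d in deps:
--             table[t][d] = {"relationship": "depends on", "direction": "incoming"}
--             table[d][t] = {"relationship": "depended on by", "direction": "outgoing"}
--     return table
--
-- _REL = _build_relationship_table()
--
-- def get_table_relationships(table_name):
--     """Get the relationships for a table: a single lookup in the precomputed table."""
--     return dict(_REL.get(table_name, {}))
-- ===== Notes on version B (the rewrite author's own statement) =====
-- stated objective: alternative
-- what changed: B precomputes once, by walking each dependency edge and recording it on both endpoints, a table mapping every table name to its complete relationships dict, so the function body is a single dict lookup instead of A's per-call scan of TABLE_RELATIONSHIPS with membership tests.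
import Mathlib
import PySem

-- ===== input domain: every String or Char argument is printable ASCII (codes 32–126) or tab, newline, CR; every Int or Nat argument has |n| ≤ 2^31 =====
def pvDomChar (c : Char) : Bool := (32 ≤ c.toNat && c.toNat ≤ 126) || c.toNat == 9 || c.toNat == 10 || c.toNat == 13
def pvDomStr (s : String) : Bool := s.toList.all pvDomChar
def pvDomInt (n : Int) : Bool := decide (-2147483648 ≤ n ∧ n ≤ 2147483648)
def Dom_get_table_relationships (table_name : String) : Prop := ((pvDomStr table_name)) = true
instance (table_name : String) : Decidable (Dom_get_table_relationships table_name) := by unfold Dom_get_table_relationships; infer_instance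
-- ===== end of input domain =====

-- B precomputes the complete answer for every table from the fixed edge list once,
-- making the call itself a single lookup (objective: alternative decomposition).

-- ===== PORT A =====
def pvTR : PySem.Dict String (List String) :=
  PySem.Dict.mk [("customers", []), ("products", []), ("orders", ["customers"]),
    ("order_items", ["orders", "products"]), ("employees", [])]

def get_table_relationships (table_name : String) : List (String × List (String × String)) :=
  let relationships : PySem.Dict String (List (String × String)) := PySem.Dict.empty
  -- 'if table_name in TABLE_RELATIONSHIPS: for dep in TABLE_RELATIONSHIPS[table_name]: …'
  -- (the subscript is guarded by the membership test, so getD is exact here)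
  let relationships :=
    if pvTR.contains table_name then
      (pvTR.getD table_name []).foldl
        (fun d dep => d.insert dep [("relationship", "depends on"), ("direction", "incoming")])
        relationships
    else relationships
  -- 'for table, deps in TABLE_RELATIONSHIPS.items(): if table_name in deps: …'
  let relationships :=
    pvTR.items.foldl
      (fun d p =>
        if table_name ∈ p.2 then
          d.insert p.1 [("relationship", "depended on by"), ("direction", "outgoing")]
        else d)
      relationships
  relationships.items

-- ===== PORT B =====
-- _build_relationship_table(): table = {name: {} for name in TABLE_RELATIONSHIPS};
-- for t, deps in items(): for d in deps: table[t][d] = incoming; table[d][t] = outgoing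
def pvRelTable : PySem.Dict String (PySem.Dict String (List (String × String))) :=
  let table :=
    pvTR.keys.foldl (fun t name => t.insert name PySem.Dict.empty) PySem.Dict.empty
  pvTR.items.foldl
    (fun tbl p =>
      p.2.foldl
        (fun tbl d =>
          let tbl := tbl.modify p.1 PySem.Dict.empty
            (·.insert d [("relationship", "depends on"), ("direction", "incoming")])
          tbl.modify d PySem.Dict.empty
            (·.insert p.1 [("relationship", "depended on by"), ("direction", "outgoing")]))
        tbl)
    table

-- return dict(_REL.get(table_name, {}))
def get_table_relationships_alt (table_name : String) : List (String × List (String × String)) :=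
  (pvRelTable.getD table_name PySem.Dict.empty).items

-- ===== PRECONDITION & SPEC =====
def Spec_get_table_relationships (table_name : String) (out : List (String × List (String × String))) : Prop := out = get_table_relationships_alt table_name
instance (table_name : String) (out : List (String × List (String × String))) : Decidable (Spec_get_table_relationships table_name out) := by unfold Spec_get_table_relationships; infer_instance

-- ===== CLAIM =====
def Claim_equal_get_table_relationships : Prop := ∀ (table_name : String), Dom_get_table_relationships table_name → Spec_get_table_relationships table_name (get_table_relationships table_name)

-- ===== LEMMAS AND PROOFS =====

-- ===== VERDICT =====
theorem get_table_relationships_spec : Claim_equal_get_table_relationships := by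
  intro t _
  unfold Spec_get_table_relationships
  by_cases h1 : t = "customers"; · subst h1; decide
  by_cases h2 : t = "products"; · subst h2; decide
  by_cases h3 : t = "orders"; · subst h3; decide
  by_cases h4 : t = "order_items"; · subst h4; decide
  by_cases h5 : t = "employees"; · subst h5; decide
  simp [get_table_relationships, get_table_relationships_alt, pvTR, pvRelTable,
    PySem.Dict.contains, PySem.Dict.getD, PySem.Dict.get?, PySem.Dict.keys,
    PySem.Dict.items, PySem.Dict.insert, PySem.Dict.modify, PySem.Dict.empty,
    h1, h2, h3, Ne.symm h1, Ne.symm h2, Ne.symm h3, Ne.symm h4, Ne.symm h5]
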